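-- pv_equiv track=rewrite | github.com/JSON-Welbourne/CodingChallenges | erdos/erdos013.py | possibleStrings
-- ===== SOURCE A (Python) =====
-- def possibleStrings(strings,characters):
--   if len(characters) == 0:
--     return strings
--   else:
--     newStrings = []
--     for i in range(len(characters)):
--       newStrings = newStrings + possibleStrings([s+characters[i] for s in strings],characters[:i]+characters[i+1:])
--     return newStrings
-- ===== SOURCE B (Python) =====
-- import itertools
--
-- def possibleStrings(strings, characters):
--     return [s + ''.join(p)
--             for p in itertools.permutations(characters)
--             for s in strings]
-- ===== Notes on version B (the rewrite author's own statement) =====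
-- stated objective: idiomatic
-- what changed: Replaces A's recursive pick-one-character-and-recurse construction (which rebuilds every base string at each level and concatenates partial result lists) by a single flat comprehension over itertools.permutations of the characters, joining each permutation once and appending it to each base string.
import Mathlib
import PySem

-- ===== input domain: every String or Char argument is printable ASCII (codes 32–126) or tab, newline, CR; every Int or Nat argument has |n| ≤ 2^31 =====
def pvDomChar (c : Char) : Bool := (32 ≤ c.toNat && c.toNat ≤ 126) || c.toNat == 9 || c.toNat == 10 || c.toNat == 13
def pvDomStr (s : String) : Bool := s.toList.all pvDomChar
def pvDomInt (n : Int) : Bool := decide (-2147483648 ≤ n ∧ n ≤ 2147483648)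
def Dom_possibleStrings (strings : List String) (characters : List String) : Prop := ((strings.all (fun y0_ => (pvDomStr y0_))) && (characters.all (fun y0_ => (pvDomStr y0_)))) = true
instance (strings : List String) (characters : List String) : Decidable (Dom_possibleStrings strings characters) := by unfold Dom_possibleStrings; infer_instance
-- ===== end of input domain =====

-- B: one flat comprehension over the permutations of `characters` (itertools order)
-- instead of A's recursive pick-and-recurse build; equivalence of the return values proved below.

-- ===== PORT A =====
-- for i in range(len(characters)): newStrings = newStrings + possibleStrings([s+characters[i] ...], characters[:i]+characters[i+1:])
-- i is always in range, so characters[i] = characters.getD i "" and the slices are take/drop (exact here since 0 ≤ i < len).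
def possibleStrings (strings : List String) (characters : List String) : List String :=
  if characters.length = 0 then strings
  else
    ((List.range characters.length).attach).foldl
      (fun newStrings i =>
        newStrings ++
          possibleStrings (strings.map (fun s => s ++ characters.getD i.1 ""))
            (characters.take i.1 ++ characters.drop (i.1 + 1)))
      []
termination_by characters.length
decreasing_by
  rcases i with ⟨i, hi⟩
  simp only [List.mem_range] at hi
  simp only [List.length_append, List.length_take, List.length_drop]
  omega

-- ===== PORT B =====
-- itertools.permutations(characters), ported by hand: exact in itertools' emission order
-- (for each index i in order, characters[i] first, then permutations of the rest).
def pyPermutations (l : List String) : List (List String) :=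
  if l.length = 0 then [[]]
  else
    ((List.range l.length).attach).foldl
      (fun acc i =>
        acc ++ (pyPermutations (l.take i.1 ++ l.drop (i.1 + 1))).map
          (fun p => l.getD i.1 "" :: p))
      []
termination_by l.length
decreasing_by
  rcases i with ⟨i, hi⟩
  simp only [List.mem_range] at hi
  simp only [List.length_append, List.length_take, List.length_drop]
  omega

-- [s + ''.join(p) for p in itertools.permutations(characters) for s in strings]
def possibleStrings_alt (strings : List String) (characters : List String) : List String :=
  (pyPermutations characters).flatMap (fun p => strings.map (fun s => s ++ String.join p))

-- ===== PRECONDITION & SPEC =====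
def Spec_possibleStrings (strings : List String) (characters : List String) (out : List String) : Prop := out = possibleStrings_alt strings characters
instance (strings : List String) (characters : List String) (out : List String) : Decidable (Spec_possibleStrings strings characters out) := by unfold Spec_possibleStrings; infer_instance

-- ===== CLAIM (what is proved, stated in full; the proofs are below) =====
def Claim_equal_possibleStrings : Prop := ∀ (strings : List String) (characters : List String), Dom_possibleStrings strings characters → Spec_possibleStrings strings characters (possibleStrings strings characters)

-- ===== LEMMAS AND PROOFS =====

theorem pv_join_foldl (p : List String) (a : String) :
    p.foldl (· ++ ·) a = a ++ p.foldl (· ++ ·) "" := by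
  induction p generalizing a with
  | nil => simp
  | cons c p ih => rw [List.foldl_cons, List.foldl_cons, ih (a ++ c), ih ("" ++ c)]
                   simp [String.append_assoc]

theorem pv_join_cons (c : String) (p : List String) :
    String.join (c :: p) = c ++ String.join p := by
  simp only [String.join, List.foldl_cons]
  rw [pv_join_foldl]
  simp

theorem pv_key (characters : List String) (strings : List String) :
    possibleStrings strings characters =
      (pyPermutations characters).flatMap (fun p => strings.map (fun s => s ++ String.join p)) := by
  by_cases h : characters.length = 0
  · rw [possibleStrings, pyPermutations, if_pos h, if_pos h]
    simp [String.join]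
  · rw [possibleStrings, pyPermutations, if_neg h, if_neg h]
    rw [PySem.List.foldl_append_eq_flatMap, PySem.List.foldl_append_eq_flatMap]
    simp only [List.nil_append]
    rw [List.flatMap_assoc]
    congr 1
    funext i
    rw [pv_key (characters.take i.1 ++ characters.drop (i.1 + 1))]
    rw [List.flatMap_map]
    congr 1
    funext p
    simp [Function.comp, List.map_map, pv_join_cons, String.append_assoc]
termination_by characters.length
decreasing_by
  rcases i with ⟨i, hi⟩
  simp only [List.mem_range] at hi
  simp only [List.length_append, List.length_take, List.length_drop]
  omega

-- ===== VERDICT (by name: the statement is the Claim_ definition above) =====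
theorem possibleStrings_spec : Claim_equal_possibleStrings := by
  intro strings characters _
  unfold Spec_possibleStrings possibleStrings_alt
  exact pv_key characters strings
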